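-- pv_equiv track=rewrite | github.com/robbie194/BubbleReduce | pipeline_partition.py | partition_uniform
-- ===== SOURCE A (Python) =====
-- from typing import List, Tuple
--
-- def partition_uniform(num_layers: int, num_stages: int) -> List[Tuple[int, int]]:
--     if num_layers < num_stages:
--         raise ValueError("层数比 stage 数还少，没法均分")
--     base = num_layers // num_stages
--     rem = num_layers % num_stages
--     boundaries = []
--     start = 0
--     for s in range(num_stages):
--         extra = 1 if s < rem else 0
--         end = start + base + extra
--         boundaries.append((start, end))
--         start = end
--     return boundaries
-- ===== SOURCE B (Python) =====
-- from typing import List, Tuple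
--
-- def partition_uniform(num_layers: int, num_stages: int) -> List[Tuple[int, int]]:
--     if num_layers < num_stages:
--         raise ValueError("层数比 stage 数还少，没法均分")
--     base = num_layers // num_stages
--     rem = num_layers % num_stages
--     cuts = [i * base + min(i, rem) for i in range(num_stages + 1)]
--     return list(zip(cuts, cuts[1:]))
-- ===== Notes on version B (the rewrite author's own statement) =====
-- stated objective: simpler
-- what changed: Replaces the running-start accumulator loop by a closed-form cutpoint list (i*base + min(i, rem)) zipped with its own tail; no state is carried between iterations.
import Mathlib
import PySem

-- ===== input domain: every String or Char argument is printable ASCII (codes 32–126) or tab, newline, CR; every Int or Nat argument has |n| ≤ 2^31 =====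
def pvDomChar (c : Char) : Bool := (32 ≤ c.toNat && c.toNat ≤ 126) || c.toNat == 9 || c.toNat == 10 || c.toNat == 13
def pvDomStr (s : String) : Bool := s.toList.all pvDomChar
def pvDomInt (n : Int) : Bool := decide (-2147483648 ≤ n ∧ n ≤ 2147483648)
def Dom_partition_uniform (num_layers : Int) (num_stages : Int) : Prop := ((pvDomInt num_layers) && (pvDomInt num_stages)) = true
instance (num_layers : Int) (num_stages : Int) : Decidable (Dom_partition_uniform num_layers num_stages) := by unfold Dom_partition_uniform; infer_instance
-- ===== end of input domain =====

-- B replaces A's running-start accumulator loop by a closed-form cutpoint list zipped with its tail (objective: simpler).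

-- ===== PORT A =====
def partition_uniform (num_layers : Int) (num_stages : Int) : List (Int × Int) :=
  -- guard 'num_layers < num_stages' raises ValueError: excluded by Pre_
  let base := PySem.Int.floordiv num_layers num_stages
  let rem := PySem.Int.mod num_layers num_stages
  let res := (PySem.List.pyRange 0 num_stages 1).foldl
    (fun (st : List (Int × Int) × Int) s =>
      let extra : Int := if s < rem then 1 else 0
      let e := st.2 + base + extra
      (st.1 ++ [(st.2, e)], e)) ([], 0)
  res.1

-- ===== PORT B =====
def partition_uniform_alt (num_layers : Int) (num_stages : Int) : List (Int × Int) :=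
  let base := PySem.Int.floordiv num_layers num_stages
  let rem := PySem.Int.mod num_layers num_stages
  let cuts := (PySem.List.pyRange 0 (num_stages + 1) 1).map (fun i => i * base + min i rem)
  List.zip cuts cuts.tail

-- ===== PRECONDITION & SPEC =====
-- Pre_ excludes exactly the inputs where A raises: ValueError when num_layers < num_stages,
-- ZeroDivisionError when num_stages = 0 (and num_layers ≥ 0).
def Pre_partition_uniform (num_layers : Int) (num_stages : Int) : Prop :=
  num_stages ≤ num_layers ∧ num_stages ≠ 0
instance (num_layers : Int) (num_stages : Int) : Decidable (Pre_partition_uniform num_layers num_stages) := by unfold Pre_partition_uniform; infer_instance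
def pvWitness_partition_uniform : Int × Int := (10, 3)

def Spec_partition_uniform (num_layers : Int) (num_stages : Int) (out : List (Int × Int)) : Prop := out = partition_uniform_alt num_layers num_stages
instance (num_layers : Int) (num_stages : Int) (out : List (Int × Int)) : Decidable (Spec_partition_uniform num_layers num_stages out) := by unfold Spec_partition_uniform; infer_instance

-- ===== CLAIM (what is proved, stated in full; the proofs are below) =====
def Claim_equal_partition_uniform : Prop := ∀ (num_layers : Int) (num_stages : Int), Dom_partition_uniform num_layers num_stages → Pre_partition_uniform num_layers num_stages → Spec_partition_uniform num_layers num_stages (partition_uniform num_layers num_stages)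

-- ===== LEMMAS AND PROOFS =====

-- the closed-form cutpoint
def pvCut (base rem i : Int) : Int := i * base + min i rem

-- one step of A's accumulator advances the closed-form cutpoint (needs 0 ≤ rem only at i = 0 start)
theorem pvCut_step (base rem : Int) (i : Int) :
    pvCut base rem i + base + (if i < rem then 1 else 0) = pvCut base rem (i + 1) := by
  simp only [pvCut, min_def]
  split_ifs <;> ring_nf <;> omega

-- A's fold over range(n) computes the zipped cutpoints and final start = pvCut n, for 0 ≤ rem.
theorem pvFoldA (base rem : Int) (hrem : 0 ≤ rem) (n : Nat) :
    (PySem.List.pyRange 0 (n : Int) 1).foldl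
      (fun (st : List (Int × Int) × Int) s =>
        let extra : Int := if s < rem then 1 else 0
        let e := st.2 + base + extra
        (st.1 ++ [(st.2, e)], e)) ([], 0)
    = ((List.range n).map (fun (s : Nat) => (pvCut base rem (s : Int), pvCut base rem ((s : Int) + 1))),
       pvCut base rem (n : Int)) := by
  induction n with
  | zero =>
    simp [PySem.List.pyRange_one_eq_nil, pvCut, min_eq_left hrem]
  | succ n ih =>
    have hsplit : PySem.List.pyRange 0 ((n : Int) + 1) 1
        = PySem.List.pyRange 0 (n : Int) 1 ++ [(n : Int)] := by
      exact PySem.List.pyRange_one_succ_right (by positivity)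
    have hcast : ((n + 1 : Nat) : Int) = (n : Int) + 1 := by push_cast; ring
    rw [hcast, hsplit, List.foldl_append, ih]
    simp only [List.foldl_cons, List.foldl_nil, List.range_succ, List.map_append,
      List.map_cons, List.map_nil]
    rw [pvCut_step]

-- zipping a mapped list with its own tail gives consecutive pairs
theorem pvZipTail (g : Nat → Int) (n : Nat) :
    List.zip ((List.range (n + 1)).map g) (((List.range (n + 1)).map g).tail)
    = (List.range n).map (fun s => ((g s : Int), g (s + 1))) := by
  apply List.ext_getElem
  · simp
  · intro i h1 h2
    simp only [List.getElem_zip, List.getElem_tail, List.getElem_map, List.getElem_range]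

theorem partition_uniform_spec : Claim_equal_partition_uniform := by
  intro nl ns _ hpre
  obtain ⟨hle, hne⟩ := hpre
  simp only [Spec_partition_uniform, partition_uniform, partition_uniform_alt]
  rcases lt_or_gt_of_ne hne with hneg | hpos
  · -- num_stages < 0: both sides are []
    rw [PySem.List.pyRange_one_eq_nil (a := 0) (b := ns) (by omega),
        PySem.List.pyRange_one_eq_nil (a := 0) (b := ns + 1) (by omega)]
    simp
  · -- num_stages > 0
    have hrem0 : 0 ≤ PySem.Int.mod nl ns := by
      rw [PySem.Int.mod_eq_emod_of_pos hpos]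
      exact Int.emod_nonneg nl (by omega)
    obtain ⟨n, rfl⟩ : ∃ n : Nat, ns = (n : Int) := ⟨ns.toNat, by omega⟩
    generalize hb : PySem.Int.floordiv nl (n : Int) = base
    generalize hm : PySem.Int.mod nl (n : Int) = rem
    rw [hm] at hrem0
    rw [pvFoldA base rem hrem0 n]
    have hc : ((n : Int) + 1 - 0).toNat = n + 1 := by omega
    rw [PySem.List.pyRange_one, hc, List.map_map]
    rw [pvZipTail ((fun i : Int => i * base + min i rem) ∘ fun k : Nat => 0 + (k : Int)) n]
    simp only [Function.comp]
    simp only [List.map_inj_left]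
    intro s _
    simp only [pvCut]
    push_cast
    ring_nf
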